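-- pv_equiv track=rewrite | github.com/asshat1981ar/synthnet | android_intelligent_agents.py | _extract_deliverables
-- ===== SOURCE A (Python) =====
-- from typing import Dict, List, Any, Optional, Tuple, Set
--
-- def _extract_deliverables(results: Dict[str, List[Dict[str, Any]]]) -> List[str]:
--     """Extract deliverables from results"""
--     deliverables = []
--
--     for agent_id, agent_results in results.items():
--         for result in agent_results:
--             if agent_id == "architecture":
--                 deliverables.extend(["Architecture design", "Documentation"])
--             elif agent_id == "ui":
--                 deliverables.extend(["UI components", "Screens"])
--             # Add more agent-specific deliverables
--
--     return list(set(deliverables))  # Remove duplicates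
-- ===== SOURCE B (Python) =====
-- _DELIVERABLES = {
--     "architecture": ["Architecture design", "Documentation"],
--     "ui": ["UI components", "Screens"],
-- }
--
--
-- def _extract_deliverables(results):
--     """Extract deliverables from results: one guarded pass + table lookup."""
--     found = set()
--     for agent_id, agent_results in results.items():
--         if agent_results:
--             found.update(_DELIVERABLES.get(agent_id, []))
--     return list(found)
-- ===== Notes on version B (the rewrite author's own statement) =====
-- stated objective: simpler
-- what changed: Replaces the nested per-result loop with a single pass over results.items() that, for each agent with a non-empty result list, looks its fixed deliverables up in a table and updates a set.
import Mathlib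
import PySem

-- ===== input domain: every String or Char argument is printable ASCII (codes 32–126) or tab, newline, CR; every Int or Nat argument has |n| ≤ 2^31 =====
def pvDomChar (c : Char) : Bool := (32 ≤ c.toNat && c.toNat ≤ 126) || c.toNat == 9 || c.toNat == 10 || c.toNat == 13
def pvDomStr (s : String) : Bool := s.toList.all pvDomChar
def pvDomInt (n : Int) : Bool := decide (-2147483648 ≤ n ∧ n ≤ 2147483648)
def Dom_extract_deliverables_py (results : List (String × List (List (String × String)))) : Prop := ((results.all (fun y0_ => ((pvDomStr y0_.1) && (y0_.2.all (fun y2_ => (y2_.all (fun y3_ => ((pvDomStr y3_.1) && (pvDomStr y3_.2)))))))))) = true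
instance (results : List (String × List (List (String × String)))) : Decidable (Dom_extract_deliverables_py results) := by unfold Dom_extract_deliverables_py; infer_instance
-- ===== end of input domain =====

-- B: one guarded pass over results.items() with a deliverables table and a set, instead of A's nested per-result loop ('simpler').
-- ===== PORT A =====
def extract_deliverables_py (results : List (String × List (List (String × String)))) : List String :=
  -- deliverables = []; for agent_id, agent_results in results.items(): for result in agent_results: …
  let deliverables : List String :=
    results.foldl (fun deliverables p =>
      p.2.foldl (fun deliverables _result =>
        if p.1 == "architecture" then
          deliverables ++ ["Architecture design", "Documentation"]
        else if p.1 == "ui" then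
          deliverables ++ ["UI components", "Screens"]
        else deliverables) deliverables) []
  -- return list(set(deliverables))  (set modelled as PySem.Set: first-occurrence order; compared as a set)
  PySem.Set.ofList deliverables

-- ===== PORT B =====
def pvDeliverablesTable : PySem.Dict String (List String) :=
  (PySem.Dict.empty.insert "architecture" ["Architecture design", "Documentation"]).insert
    "ui" ["UI components", "Screens"]

def extract_deliverables_py_alt (results : List (String × List (List (String × String)))) : List String :=
  -- found = set(); for agent_id, agent_results in results.items(): if agent_results: found.update(table.get(agent_id, [])); return list(found)
  results.foldl (fun found p =>
    if p.2.isEmpty then found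
    else PySem.Set.update found (PySem.Dict.getD pvDeliverablesTable p.1 [])) PySem.Set.empty

-- ===== PRECONDITION & SPEC =====
def Spec_extract_deliverables_py (results : List (String × List (List (String × String)))) (out : List String) : Prop := out = extract_deliverables_py_alt results
instance (results : List (String × List (List (String × String)))) (out : List String) : Decidable (Spec_extract_deliverables_py results out) := by unfold Spec_extract_deliverables_py; infer_instance

-- ===== CLAIM (what is proved, stated in full; the proofs are below) =====
def Claim_equal_extract_deliverables_py : Prop := ∀ (results : List (String × List (List (String × String)))), Dom_extract_deliverables_py results → Spec_extract_deliverables_py results (extract_deliverables_py results)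

-- ===== LEMMAS AND PROOFS =====

def pvBlk (id : String) : List String :=
  if id == "architecture" then ["Architecture design", "Documentation"]
  else if id == "ui" then ["UI components", "Screens"] else []

theorem pvGetD_table (id : String) :
    PySem.Dict.getD pvDeliverablesTable id [] = pvBlk id := by
  simp only [pvDeliverablesTable, pvBlk, PySem.Dict.getD_insert, PySem.Dict.getD_empty]
  by_cases h1 : id = "architecture" <;> by_cases h2 : id = "ui" <;>
    simp_all

theorem pvUpdate_of_subset {α : Type} [BEq α] [LawfulBEq α] (s : PySem.Set α) (l : List α)
    (h : ∀ x ∈ l, x ∈ s) : PySem.Set.update s l = s := by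
  induction l generalizing s with
  | nil => rfl
  | cons x xs ih =>
    rw [PySem.Set.update_cons, PySem.Set.add_of_mem (h x (by simp))]
    exact ih s (fun y hy => h y (by simp [hy]))

theorem pvUpdate_idem {α : Type} [BEq α] [LawfulBEq α] (s : PySem.Set α) (l : List α) :
    PySem.Set.update (PySem.Set.update s l) l = PySem.Set.update s l :=
  pvUpdate_of_subset _ _ (fun _x hx => (PySem.Set.mem_update _ _ _).2 (Or.inr hx))

theorem pvInner (blk : List String) (rs : List (List (String × String))) (acc : List String) :
    PySem.Set.ofList (rs.foldl (fun d _ => d ++ blk) acc)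
      = if rs.isEmpty then PySem.Set.ofList acc
        else PySem.Set.update (PySem.Set.ofList acc) blk := by
  induction rs generalizing acc with
  | nil => rfl
  | cons r rs ih =>
    simp only [List.foldl_cons, List.isEmpty_cons, if_false, Bool.false_eq_true]
    rw [ih (acc ++ blk), PySem.Set.ofList_append]
    by_cases h : rs.isEmpty <;> simp [h, pvUpdate_idem]

theorem pvMain (results : List (String × List (List (String × String)))) (acc : List String) :
    PySem.Set.ofList (results.foldl (fun d p =>
        p.2.foldl (fun d _ =>
          if p.1 == "architecture" then d ++ ["Architecture design", "Documentation"]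
          else if p.1 == "ui" then d ++ ["UI components", "Screens"]
          else d) d) acc)
      = results.foldl (fun s p =>
          if p.2.isEmpty then s
          else PySem.Set.update s (PySem.Dict.getD pvDeliverablesTable p.1 []))
          (PySem.Set.ofList acc) := by
  induction results generalizing acc with
  | nil => rfl
  | cons p ps ih =>
    simp only [List.foldl_cons]
    rw [ih]
    congr 1
    have hbody : (fun (d : List String) (_ : List (String × String)) =>
        if p.1 == "architecture" then d ++ ["Architecture design", "Documentation"]
        else if p.1 == "ui" then d ++ ["UI components", "Screens"]
        else d) = (fun d _ => d ++ pvBlk p.1) := by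
      funext d r
      simp only [pvBlk]
      by_cases h1 : p.1 == "architecture" <;> by_cases h2 : p.1 == "ui" <;> simp [h1, h2]
    rw [hbody, pvInner, pvGetD_table]

-- ===== VERDICT (by name: the statement is the Claim_ definition above) =====
theorem extract_deliverables_py_spec : Claim_equal_extract_deliverables_py := by
  intro results _
  unfold Spec_extract_deliverables_py extract_deliverables_py extract_deliverables_py_alt
  exact pvMain results []
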